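-- pv_equiv track=rewrite | github.com/luvbyte/seagle | seagle/modes/sc/handlers.py | __depricated_parse_custom_format
-- ===== SOURCE A (Python) =====
-- def __depricated_parse_custom_format(text: str, match_prefix: str) -> dict:
--   lines = text.strip().splitlines()
--   result = {}
--   current_key = None
--   current_value = []
--
--   for line in lines:
--     if line.startswith(match_prefix):
--       # Save previous section
--       if current_key is not None:
--         result[current_key] = '\n'.join(current_value).strip()
--
--       # Split the line into key and optional value
--       parts = line[1:].split(' ', 1)
--       current_key = parts[0].strip()
--       current_value = [parts[1].strip()] if len(parts) > 1 else []
--     else: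
--       current_value.append(line)
--
--   # Save last section
--   if current_key is not None:
--     result[current_key] = '\n'.join(current_value).strip()
--
--   return result
-- ===== SOURCE B (Python) =====
-- def __depricated_parse_custom_format(text: str, match_prefix: str) -> dict:
--   lines = text.strip().splitlines()
--
--   # Pass 1: group into blocks via index scanning (two-pointer):
--   # each block is (header line, following non-prefix lines); leading
--   # non-prefix lines are skipped.
--   blocks = []
--   i = 0
--   n = len(lines)
--   while i < n:
--     if lines[i].startswith(match_prefix):
--       j = i + 1
--       while j < n and not lines[j].startswith(match_prefix):
--         j += 1
--       blocks.append((lines[i], lines[i + 1:j]))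
--       i = j
--     else:
--       i += 1
--
--   # Pass 2: map each block to a (key, value) pair; dict keeps the last
--   # value for duplicate keys at the first insertion position.
--   result = {}
--   for header, body in blocks:
--     parts = header[1:].split(' ', 1)
--     key = parts[0].strip()
--     vals = ([parts[1].strip()] if len(parts) > 1 else []) + body
--     result[key] = '\n'.join(vals).strip()
--   return result
-- ===== Notes on version B (the rewrite author's own statement) =====
-- stated objective: alternative
-- what changed: Replaces A's save-on-boundary accumulator (result/current_key/current_value threaded through one loop) by a two-pointer grouping pass that slices the lines into (header, body) blocks, followed by a separate pass mapping each block to a dict entry.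
import Mathlib
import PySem

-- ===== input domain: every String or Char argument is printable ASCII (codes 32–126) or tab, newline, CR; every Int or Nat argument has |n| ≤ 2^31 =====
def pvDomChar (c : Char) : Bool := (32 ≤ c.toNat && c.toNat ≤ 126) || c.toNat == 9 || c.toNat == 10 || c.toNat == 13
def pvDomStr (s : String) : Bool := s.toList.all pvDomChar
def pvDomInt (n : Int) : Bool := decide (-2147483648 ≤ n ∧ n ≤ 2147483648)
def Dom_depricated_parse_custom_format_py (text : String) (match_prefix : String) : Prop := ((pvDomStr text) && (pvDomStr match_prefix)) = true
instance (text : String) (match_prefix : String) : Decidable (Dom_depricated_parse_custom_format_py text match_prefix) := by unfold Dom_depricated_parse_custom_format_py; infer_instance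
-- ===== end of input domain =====

-- B replaces A's save-on-boundary accumulator by a two-pointer grouping pass into
-- (header, body) blocks followed by a separate mapping pass; same return value (alternative).


-- ===== PORT A =====
-- the loop body of A: state = (result, current_key, current_value)
def pvStepA (match_prefix : String)
    (st : PySem.Dict String String × Option String × List String) (line : String) :
    PySem.Dict String String × Option String × List String :=
  if PySem.Str.startswith line match_prefix then
    -- save previous section
    let d := match st.2.1 with
      | some k => st.1.insert k (PySem.Str.strip (PySem.Str.join "\n" st.2.2))
      | none => st.1
    -- parts = line[1:].split(' ', 1); split of a nonempty separator is always some,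
    -- and it never returns [], so parts.headD "" is exactly parts[0]
    let parts := (PySem.Str.splitMax? (PySem.Str.slice line (some 1) none) " " 1).getD []
    (d, some (PySem.Str.strip (parts.headD "")),
     match parts with
     | _ :: p1 :: _ => [PySem.Str.strip p1]
     | _ => [])
  else (st.1, st.2.1, st.2.2 ++ [line])

-- the final 'save last section'
def pvFinishA (st : PySem.Dict String String × Option String × List String) :
    PySem.Dict String String :=
  match st.2.1 with
  | some k => st.1.insert k (PySem.Str.strip (PySem.Str.join "\n" st.2.2))
  | none => st.1

def depricated_parse_custom_format_py (text : String) (match_prefix : String) : List (String × String) :=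
  let lines := PySem.Str.splitlines (PySem.Str.strip text)
  (pvFinishA (lines.foldl (pvStepA match_prefix) (PySem.Dict.empty, none, []))).items

-- ===== PORT B =====
-- Pass 1 of Source B: two-pointer grouping. The inner 'while j' collects exactly the
-- non-prefix lines following the header (takeWhile) and resumes scanning at the
-- next prefix line (dropWhile); the 'else: i += 1' skips a leading non-prefix line.
def pvGroupBlocks (match_prefix : String) : List String → List (String × List String)
  | [] => []
  | l :: ls =>
    if PySem.Str.startswith l match_prefix then
      (l, ls.takeWhile (fun x => !PySem.Str.startswith x match_prefix)) ::
        pvGroupBlocks match_prefix (ls.dropWhile (fun x => !PySem.Str.startswith x match_prefix))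
    else pvGroupBlocks match_prefix ls
termination_by ls => ls.length
decreasing_by
  · exact Nat.lt_succ_of_le (List.length_dropWhile_le _ _)
  · simp

-- Pass 2 of Source B: one block -> one dict entry
def pvInsBlock (d : PySem.Dict String String) (b : String × List String) :
    PySem.Dict String String :=
  let parts := (PySem.Str.splitMax? (PySem.Str.slice b.1 (some 1) none) " " 1).getD []
  let key := PySem.Str.strip (parts.headD "")
  let vals := (match parts with
    | _ :: p1 :: _ => [PySem.Str.strip p1]
    | _ => []) ++ b.2
  d.insert key (PySem.Str.strip (PySem.Str.join "\n" vals))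

def depricated_parse_custom_format_py_alt (text : String) (match_prefix : String) : List (String × String) :=
  let lines := PySem.Str.splitlines (PySem.Str.strip text)
  ((pvGroupBlocks match_prefix lines).foldl pvInsBlock PySem.Dict.empty).items

-- ===== PRECONDITION & SPEC =====
def Spec_depricated_parse_custom_format_py (text : String) (match_prefix : String) (out : List (String × String)) : Prop := out = depricated_parse_custom_format_py_alt text match_prefix
instance (text : String) (match_prefix : String) (out : List (String × String)) : Decidable (Spec_depricated_parse_custom_format_py text match_prefix out) := by unfold Spec_depricated_parse_custom_format_py; infer_instance

-- ===== CLAIM (what is proved, stated in full; the proofs are below) =====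
def Claim_equal_depricated_parse_custom_format_py : Prop := ∀ (text : String) (match_prefix : String), Dom_depricated_parse_custom_format_py text match_prefix → Spec_depricated_parse_custom_format_py text match_prefix (depricated_parse_custom_format_py text match_prefix)

-- ===== LEMMAS AND PROOFS =====

-- A's loop started in a 'some k' state finishes like B: the still-open section
-- absorbs the next run of non-prefix lines, and the remaining blocks follow.
lemma pv_foldl_some (pfx : String) (lines : List String) :
    ∀ (d : PySem.Dict String String) (k : String) (cv : List String),
    pvFinishA (lines.foldl (pvStepA pfx) (d, some k, cv)) =
      (pvGroupBlocks pfx (lines.dropWhile (fun x => !PySem.Str.startswith x pfx))).foldl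
        pvInsBlock
        (d.insert k (PySem.Str.strip (PySem.Str.join "\n"
          (cv ++ lines.takeWhile (fun x => !PySem.Str.startswith x pfx))))) := by
  induction lines with
  | nil => intro d k cv; simp [pvFinishA, pvGroupBlocks]
  | cons l ls ih =>
    intro d k cv
    by_cases h : PySem.Str.startswith l pfx
    · have h' : PySem.Chars.startswith l.toList pfx.toList = true := by simpa using h
      simp only [List.foldl_cons, pvStepA, h, if_pos]
      rw [ih]
      simp [h', pvGroupBlocks, pvInsBlock]
    · have h' : PySem.Chars.startswith l.toList pfx.toList = false := by simpa using h
      simp only [List.foldl_cons, pvStepA, h, if_neg, Bool.not_eq_true]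
      rw [ih]
      simp [h']

-- A's loop started with no current key drops leading non-prefix lines, like B.
lemma pv_foldl_none (pfx : String) (lines : List String) :
    ∀ (d : PySem.Dict String String) (cv : List String),
    pvFinishA (lines.foldl (pvStepA pfx) (d, none, cv)) =
      (pvGroupBlocks pfx lines).foldl pvInsBlock d := by
  induction lines with
  | nil => intro d cv; simp [pvFinishA, pvGroupBlocks]
  | cons l ls ih =>
    intro d cv
    by_cases h : PySem.Str.startswith l pfx
    · have h' : PySem.Chars.startswith l.toList pfx.toList = true := by simpa using h
      simp only [List.foldl_cons, pvStepA, h, if_pos]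
      rw [pv_foldl_some]
      simp [pvGroupBlocks, h', pvInsBlock]
    · have h' : PySem.Chars.startswith l.toList pfx.toList = false := by simpa using h
      simp only [List.foldl_cons, pvStepA, h, if_neg, Bool.not_eq_true]
      rw [ih]
      simp [pvGroupBlocks, h']

-- ===== VERDICT (by name: the statement is the Claim_ definition above) =====
theorem depricated_parse_custom_format_py_spec : Claim_equal_depricated_parse_custom_format_py := by
  intro text match_prefix _
  unfold Spec_depricated_parse_custom_format_py
  exact congrArg PySem.Dict.items
    (pv_foldl_none match_prefix (PySem.Str.splitlines (PySem.Str.strip text)) PySem.Dict.empty [])
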